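-- pv_equiv track=rewrite | github.com/pydantic/pydantic-ai | pydantic_ai_slim/pydantic_ai/ui/web/__init__.py | format_model_display_name
-- ===== SOURCE A (Python) =====
-- def format_model_display_name(model_name: str) -> str:
--     """Format model name for display in UI.
--
--     Handles common patterns:
--     - gpt-5 -> GPT 5
--     - claude-sonnet-4-5 -> Claude Sonnet 4.5
--     - gemini-2.5-pro -> Gemini 2.5 Pro
--     """
--     parts = model_name.split('-')
--     result: list[str] = []
--
--     for i, part in enumerate(parts):
--         if i == 0 and part.lower() == 'gpt':
--             result.append(part.upper())
--         elif part.replace('.', '').isdigit():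
--             if result and result[-1].replace('.', '').isdigit():
--                 result[-1] = f'{result[-1]}.{part}'
--             else:
--                 result.append(part)
--         else:
--             result.append(part.capitalize())
--
--     return ' '.join(result)
-- ===== SOURCE B (Python) =====
-- def _is_num(part: str) -> bool:
--     return part.replace('.', '').isdigit()
--
--
-- def format_model_display_name(model_name: str) -> str:
--     """Format model name for display in UI (grouping re-implementation)."""
--     parts = model_name.split('-')
--     n = len(parts)
--     out: list[str] = []
--     i = 0
--     while i < n:
--         if _is_num(parts[i]):
--             # collect the maximal run of consecutive numeric parts
--             j = i
--             while j + 1 < n and _is_num(parts[j + 1]):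
--                 j += 1
--             out.append('.'.join(parts[i:j + 1]))
--             i = j + 1
--         else:
--             p = parts[i]
--             out.append(p.upper() if i == 0 and p.lower() == 'gpt' else p.capitalize())
--             i += 1
--     return ' '.join(out)
-- ===== Notes on version B (the rewrite author's own statement) =====
-- stated objective: alternative
-- what changed: Replaced A's emit-time lookback accumulator (appending and merging into the last result slot) by an explicit grouping pass that collects each maximal run of consecutive numeric parts and emits it dot-joined in one step.
import Mathlib
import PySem

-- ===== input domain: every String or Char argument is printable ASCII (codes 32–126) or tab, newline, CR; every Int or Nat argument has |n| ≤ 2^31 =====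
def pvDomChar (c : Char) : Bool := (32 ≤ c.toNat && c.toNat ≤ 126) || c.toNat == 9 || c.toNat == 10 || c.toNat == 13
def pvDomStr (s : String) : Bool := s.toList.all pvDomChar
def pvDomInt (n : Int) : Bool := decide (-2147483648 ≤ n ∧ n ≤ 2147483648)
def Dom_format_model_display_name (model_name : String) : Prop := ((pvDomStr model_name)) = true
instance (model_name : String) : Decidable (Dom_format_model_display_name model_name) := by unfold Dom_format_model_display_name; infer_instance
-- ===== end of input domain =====

-- B replaces A's emit-time lookback merge (peeking at result[-1]) by an explicit grouping pass over
-- maximal runs of numeric parts; objective: alternative decomposition, same linear cost.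

-- ===== PORT A =====
-- part.replace('.', '').isdigit()
def fmdnIsNum (p : List Char) : Bool :=
  PySem.Chars.strIsdigit (PySem.Chars.replace p ['.'] [])

-- Python str.capitalize(): first char uppercased, the rest lowercased — exact on the ASCII domain
def fmdnCapitalize (p : List Char) : List Char :=
  match p with
  | [] => []
  | c :: cs => PySem.Chars.upperChar c :: PySem.Chars.lower cs

-- one iteration of A's for-loop: (i, part) updates result
def fmdnStepA (result : List (List Char)) (ip : Int × List Char) : List (List Char) :=
  if ip.1 == 0 && (PySem.Chars.lower ip.2 == ['g', 'p', 't']) then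
    result ++ [PySem.Chars.upper ip.2]
  else if fmdnIsNum ip.2 then
    match result.getLast? with
    | some last =>
        if fmdnIsNum last then result.dropLast ++ [last ++ '.' :: ip.2]  -- result[-1] = f'{result[-1]}.{part}'
        else result ++ [ip.2]
    | none => result ++ [ip.2]
  else result ++ [fmdnCapitalize ip.2]

def format_model_display_name (model_name : String) : String :=
  let parts := PySem.Chars.splitOn model_name.toList ['-']
  String.ofList (PySem.Chars.join [' ']
    ((PySem.List.enumerate parts 0).foldl fmdnStepA []))

-- ===== PORT B =====
-- out.append(p.upper() if i == 0 and p.lower() == 'gpt' else p.capitalize())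
def fmdnEmit (i : Nat) (p : List Char) : List Char :=
  if i == 0 && (PySem.Chars.lower p == ['g', 'p', 't']) then PySem.Chars.upper p
  else fmdnCapitalize p

-- the outer while loop of B: group a maximal numeric run, else emit one part
def fmdnGoB (i : Nat) (l : List (List Char)) : List (List Char) :=
  match l with
  | [] => []
  | p :: rest =>
    if fmdnIsNum p then
      PySem.Chars.join ['.'] (p :: rest.takeWhile fmdnIsNum) ::
        fmdnGoB (i + 1 + (rest.takeWhile fmdnIsNum).length) (rest.dropWhile fmdnIsNum)
    else fmdnEmit i p :: fmdnGoB (i + 1) rest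
termination_by l.length
decreasing_by
  · exact Nat.lt_succ_of_le (List.length_dropWhile_le _ _)
  · simp

def format_model_display_name_alt (model_name : String) : String :=
  let parts := PySem.Chars.splitOn model_name.toList ['-']
  String.ofList (PySem.Chars.join [' '] (fmdnGoB 0 parts))

-- ===== PRECONDITION & SPEC =====
def Spec_format_model_display_name (model_name : String) (out : String) : Prop := out = format_model_display_name_alt model_name
instance (model_name : String) (out : String) : Decidable (Spec_format_model_display_name model_name out) := by unfold Spec_format_model_display_name; infer_instance

-- ===== CLAIM (what is proved, stated in full; the proofs are below) =====
def Claim_equal_format_model_display_name : Prop := ∀ (model_name : String), Dom_format_model_display_name model_name → Spec_format_model_display_name model_name (format_model_display_name model_name)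

-- ===== LEMMAS AND PROOFS =====

theorem charLe (a b : Char) : (a ≤ b) ↔ a.toNat ≤ b.toNat := Char.le_def.trans UInt32.le_iff_toNat_le

theorem charEq (a b : Char) : (a = b) ↔ a.toNat = b.toNat := by
  constructor
  · intro h; rw [h]
  · intro h; exact Char.ext (UInt32.toNat_inj.mp h)

theorem replace_dot_go (fuel : Nat) : ∀ (l acc : List Char), l.length ≤ fuel →
    PySem.Chars.replace.go ['.'] [] fuel l acc = acc.reverse ++ l.filter (· != '.') := by
  induction fuel with
  | zero => intro l acc h; rw [List.length_eq_zero_iff.mp (Nat.le_zero.mp h)]; simp [PySem.Chars.replace.go]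
  | succ m ih =>
    intro l acc h
    match l with
    | [] => simp [PySem.Chars.replace.go]
    | c :: t =>
      rw [PySem.Chars.replace.go]
      by_cases hc : c = '.'
      · subst hc
        rw [if_pos (by simp [List.isPrefixOf])]
        show PySem.Chars.replace.go ['.'] [] m t acc = _
        rw [ih t acc (by simpa using Nat.le_of_succ_le_succ h)]
        simp
      · rw [if_neg (by simp [List.isPrefixOf]; exact fun hh => hc hh.symm)]
        rw [ih t (c :: acc) (by simpa using Nat.le_of_succ_le_succ h)]
        simp [hc]

theorem replace_dot (p : List Char) :
    PySem.Chars.replace p ['.'] [] = p.filter (· != '.') := by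
  rw [PySem.Chars.replace, if_neg (by simp)]
  simpa using replace_dot_go p.length p [] le_rfl

theorem isNum_eq (p : List Char) :
    fmdnIsNum p = (!(p.filter (· != '.')).isEmpty && (p.filter (· != '.')).all PySem.Chars.isdigit) := by
  rw [fmdnIsNum, replace_dot, PySem.Chars.strIsdigit]

theorem isdigit_upperChar (c : Char) : PySem.Chars.isdigit (PySem.Chars.upperChar c) = PySem.Chars.isdigit c := by
  have h9 : '9'.toNat = 57 := rfl
  have h0 : '0'.toNat = 48 := rfl
  unfold PySem.Chars.upperChar PySem.Chars.islower PySem.Chars.isdigit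
  split_ifs with h
  · simp only [Bool.and_eq_true, decide_eq_true_eq, charLe] at h
    have ha : 'a'.toNat = 97 := rfl
    have hz : 'z'.toNat = 122 := rfl
    have hv : (Char.ofNat (c.toNat - 32)).toNat = c.toNat - 32 := by
      rw [Char.toNat_ofNat, if_pos]
      constructor <;> omega
    rw [Bool.eq_iff_iff]
    simp only [Bool.and_eq_true, decide_eq_true_eq, charLe, hv, h9, h0]
    omega
  · rfl

theorem isdigit_lowerChar (c : Char) : PySem.Chars.isdigit (PySem.Chars.lowerChar c) = PySem.Chars.isdigit c := by
  have h9 : '9'.toNat = 57 := rfl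
  have h0 : '0'.toNat = 48 := rfl
  unfold PySem.Chars.lowerChar PySem.Chars.isupper PySem.Chars.isdigit
  split_ifs with h
  · simp only [Bool.and_eq_true, decide_eq_true_eq, charLe] at h
    have ha : 'A'.toNat = 65 := rfl
    have hz : 'Z'.toNat = 90 := rfl
    have hv : (Char.ofNat (c.toNat + 32)).toNat = c.toNat + 32 := by
      rw [Char.toNat_ofNat, if_pos]
      constructor <;> omega
    rw [Bool.eq_iff_iff]
    simp only [Bool.and_eq_true, decide_eq_true_eq, charLe, hv, h9, h0]
    omega
  · rfl

theorem upperChar_dot (c : Char) : (PySem.Chars.upperChar c != '.') = (c != '.') := by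
  unfold PySem.Chars.upperChar PySem.Chars.islower
  split_ifs with h
  · simp only [Bool.and_eq_true, decide_eq_true_eq, charLe] at h
    have ha : 'a'.toNat = 97 := rfl
    have hz : 'z'.toNat = 122 := rfl
    have hv : (Char.ofNat (c.toNat - 32)).toNat = c.toNat - 32 := by
      rw [Char.toNat_ofNat, if_pos]; constructor <;> omega
    have hd : '.'.toNat = 46 := rfl
    rw [Bool.eq_iff_iff]
    simp only [bne_iff_ne, ne_eq, charEq, hv, hd]
    omega
  · rfl

theorem lowerChar_dot (c : Char) : (PySem.Chars.lowerChar c != '.') = (c != '.') := by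
  unfold PySem.Chars.lowerChar PySem.Chars.isupper
  split_ifs with h
  · simp only [Bool.and_eq_true, decide_eq_true_eq, charLe] at h
    have ha : 'A'.toNat = 65 := rfl
    have hz : 'Z'.toNat = 90 := rfl
    have hv : (Char.ofNat (c.toNat + 32)).toNat = c.toNat + 32 := by
      rw [Char.toNat_ofNat, if_pos]; constructor <;> omega
    have hd : '.'.toNat = 46 := rfl
    rw [Bool.eq_iff_iff]
    simp only [bne_iff_ne, ne_eq, charEq, hv, hd]
    omega
  · rfl

theorem lowerChar_g (a : Char) (h : PySem.Chars.lowerChar a = 'g') : a = 'g' ∨ a = 'G' := by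
  unfold PySem.Chars.lowerChar PySem.Chars.isupper at h
  split_ifs at h with hc
  · simp only [Bool.and_eq_true, decide_eq_true_eq, charLe] at hc
    have ha : 'A'.toNat = 65 := rfl
    have hz : 'Z'.toNat = 90 := rfl
    have hv : (Char.ofNat (a.toNat + 32)).toNat = a.toNat + 32 := by
      rw [Char.toNat_ofNat, if_pos]; constructor <;> omega
    rw [charEq] at h
    rw [hv] at h
    right
    rw [charEq]
    have : 'g'.toNat = 103 := rfl
    have : 'G'.toNat = 71 := rfl
    omega
  · left; exact h

theorem filter_lower (cs : List Char) :
    (PySem.Chars.lower cs).filter (· != '.') = PySem.Chars.lower (cs.filter (· != '.')) := by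
  induction cs with
  | nil => rfl
  | cons c t ih =>
    simp only [PySem.Chars.lower, List.map_cons, List.filter_cons, lowerChar_dot c]
    by_cases h : (c != '.') = true
    · simp [h, PySem.Chars.lower] at *; exact ih
    · simp only [Bool.not_eq_true] at h; simp [h, PySem.Chars.lower] at *; exact ih

theorem all_isdigit_lower (cs : List Char) :
    (PySem.Chars.lower cs).all PySem.Chars.isdigit = cs.all PySem.Chars.isdigit := by
  induction cs with
  | nil => rfl
  | cons c t ih =>
    rw [show PySem.Chars.lower (c :: t) = PySem.Chars.lowerChar c :: PySem.Chars.lower t from rfl]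
    rw [List.all_cons, List.all_cons, isdigit_lowerChar, ih]

theorem isEmpty_lower (cs : List Char) : (PySem.Chars.lower cs).isEmpty = cs.isEmpty := by
  cases cs <;> rfl

theorem isNum_capitalize (p : List Char) : fmdnIsNum (fmdnCapitalize p) = fmdnIsNum p := by
  match p with
  | [] => rfl
  | c :: cs =>
    rw [isNum_eq, isNum_eq]
    rw [show fmdnCapitalize (c :: cs) = PySem.Chars.upperChar c :: PySem.Chars.lower cs from rfl]
    rw [List.filter_cons, List.filter_cons, upperChar_dot c, filter_lower]
    by_cases h : (c != '.') = true
    · rw [if_pos h, if_pos h, List.all_cons, List.all_cons, isdigit_upperChar, all_isdigit_lower]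
      rw [List.isEmpty_cons, List.isEmpty_cons]
    · rw [if_neg (by simp_all), if_neg (by simp_all), all_isdigit_lower, isEmpty_lower]

theorem isNum_head_bad (a : Char) (rest : List Char) (hdot : (a != '.') = true)
    (hdig : PySem.Chars.isdigit a = false) : fmdnIsNum (a :: rest) = false := by
  rw [isNum_eq, List.filter_cons, if_pos hdot, List.all_cons, hdig]
  rw [Bool.false_and, Bool.and_false]

theorem isNum_of_lower_gpt (p : List Char) (h : PySem.Chars.lower p = ['g', 'p', 't']) :
    fmdnIsNum p = false ∧ fmdnIsNum (PySem.Chars.upper p) = false := by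
  rcases p with _ | ⟨a, _ | ⟨b, _ | ⟨c, _ | ⟨d, t⟩⟩⟩⟩ <;>
    simp only [PySem.Chars.lower, List.map_cons, List.map_nil, List.cons.injEq, and_true] at h
  case nil => exact absurd h (by simp)
  case cons.nil => exact absurd h (by simp)
  case cons.cons.nil => exact absurd h (by simp)
  case cons.cons.cons.cons => exact absurd h (by simp)
  obtain ⟨h1, -, -⟩ := h
  have hup : PySem.Chars.upper [a, b, c] =
      PySem.Chars.upperChar a :: PySem.Chars.upper [b, c] := rfl
  rcases lowerChar_g a h1 with rfl | rfl
  · exact ⟨isNum_head_bad _ _ (by decide) (by decide),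
      by rw [hup]; exact isNum_head_bad _ _ (by decide) (by decide)⟩
  · exact ⟨isNum_head_bad _ _ (by decide) (by decide),
      by rw [hup]; exact isNum_head_bad _ _ (by decide) (by decide)⟩

theorem isNum_merge (s q : List Char) (hs : fmdnIsNum s = true) (hq : fmdnIsNum q = true) :
    fmdnIsNum (s ++ '.' :: q) = true := by
  rw [isNum_eq] at hs hq ⊢
  rw [List.filter_append, List.filter_cons]
  rw [show (('.' : Char) != '.') = false from rfl]
  simp only [Bool.false_eq_true, if_false]
  simp only [Bool.and_eq_true, Bool.not_eq_true', List.all_append] at hs hq ⊢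
  refine ⟨?_, hs.2, hq.2⟩
  have h1 : List.filter (fun x => x != '.') s ≠ [] := by
    intro hh; rw [hh] at hs; simp at hs
  cases hfs : List.filter (fun x => x != '.') s with
  | nil => exact absurd hfs h1
  | cons x xs => rfl

theorem emit_not_num (i : Nat) (p : List Char) (h : fmdnIsNum p = false) :
    fmdnIsNum (fmdnEmit i p) = false := by
  unfold fmdnEmit
  split_ifs with hc
  · simp only [Bool.and_eq_true, beq_iff_eq] at hc
    exact (isNum_of_lower_gpt p hc.2).2
  · rw [isNum_capitalize]; exact h

theorem head_dropWhile {α : Type} (f : α → Bool) : ∀ (l : List α) (p : α),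
    (l.dropWhile f).head? = some p → f p = false := by
  intro l
  induction l with
  | nil => intro p hp; simp [List.dropWhile] at hp
  | cons a t ih =>
    intro p hp
    rw [List.dropWhile_cons] at hp
    split_ifs at hp with hf
    · exact ih p hp
    · simp at hp; subst hp; simpa using hf

theorem joinDotFold (run : List (List Char)) : ∀ (s : List Char),
    run.foldl (fun t q => t ++ '.' :: q) s = PySem.Chars.join ['.'] (s :: run) := by
  induction run with
  | nil => intro s; simp [PySem.Chars.join, List.intercalate]
  | cons q t ih =>
    intro s
    rw [List.foldl_cons, ih (s ++ '.' :: q)]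
    rw [PySem.Chars.join, PySem.Chars.join]
    cases t with
    | nil => simp [List.intercalate]
    | cons u v => simp [List.intercalate, List.intersperse]

theorem runA (run : List (List Char)) (hrun : ∀ q ∈ run, fmdnIsNum q = true) :
    ∀ (rest : List (List Char)) (i : Int), 1 ≤ i → ∀ (acc : List (List Char)) (s : List Char), fmdnIsNum s = true →
    (PySem.List.enumerate (run ++ rest) i).foldl fmdnStepA (acc ++ [s]) =
      (PySem.List.enumerate rest (i + run.length)).foldl fmdnStepA
        (acc ++ [run.foldl (fun t q => t ++ '.' :: q) s]) := by
  induction run with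
  | nil => intro rest i hi acc s hs; simp
  | cons q t ih =>
    intro rest i hi acc s hs
    rw [List.cons_append, PySem.List.enumerate_cons, List.foldl_cons]
    have hq : fmdnIsNum q = true := hrun q List.mem_cons_self
    have hstep : fmdnStepA (acc ++ [s]) (i, q) = acc ++ [s ++ '.' :: q] := by
      unfold fmdnStepA
      rw [if_neg, if_pos hq, List.getLast?_concat]
      · dsimp only
        rw [if_pos hs, List.dropLast_concat]
      · simp only [Bool.and_eq_true, beq_iff_eq, not_and]
        intro h0; omega
    rw [hstep, ih (fun r hr => hrun r (List.mem_cons_of_mem q hr)) rest (i + 1) (by omega)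
      acc (s ++ '.' :: q) (isNum_merge s q hs hq)]
    rw [List.foldl_cons]
    rw [show i + 1 + (t.length : Int) = i + (((q :: t).length : Nat) : Int) from by
      simp only [List.length_cons]; push_cast; ring]

theorem mainA (n : Nat) : ∀ (parts : List (List Char)), parts.length ≤ n →
    ∀ (i : Nat) (acc : List (List Char)),
    (∀ p, parts.head? = some p → fmdnIsNum p = true →
      ∀ l, acc.getLast? = some l → fmdnIsNum l = false) →
    (PySem.List.enumerate parts (i : Int)).foldl fmdnStepA acc = acc ++ fmdnGoB i parts := by
  induction n with
  | zero =>
    intro parts h i acc _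
    rw [List.length_eq_zero_iff.mp (Nat.le_zero.mp h)]
    simp [fmdnGoB]
  | succ m ih =>
    intro parts h i acc H
    match parts with
    | [] => simp [fmdnGoB]
    | p :: rest =>
      rw [PySem.List.enumerate_cons, List.foldl_cons]
      by_cases hp : fmdnIsNum p = true
      · -- numeric head: A appends p, then the whole numeric run merges into that slot
        have hstep : fmdnStepA acc ((i : Int), p) = acc ++ [p] := by
          unfold fmdnStepA
          rw [if_neg, if_pos hp]
          · cases hl : acc.getLast? with
            | none => rfl
            | some l => dsimp only; rw [H p rfl hp l hl]; simp
          · simp only [Bool.and_eq_true, beq_iff_eq, not_and]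
            intro _ hgpt
            exact absurd hp (by rw [(isNum_of_lower_gpt p hgpt).1]; simp)
        rw [hstep]
        rw [show PySem.List.enumerate rest ((i : Int) + 1) =
          PySem.List.enumerate (rest.takeWhile fmdnIsNum ++ rest.dropWhile fmdnIsNum) ((i : Int) + 1) from by
            rw [List.takeWhile_append_dropWhile]]
        rw [runA (rest.takeWhile fmdnIsNum) (fun q hq => List.mem_takeWhile_imp hq)
          (rest.dropWhile fmdnIsNum) ((i : Int) + 1) (by omega) acc p hp]
        rw [joinDotFold]
        rw [show (i : Int) + 1 + ((rest.takeWhile fmdnIsNum).length : Int) =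
            ((i + 1 + (rest.takeWhile fmdnIsNum).length : Nat) : Int) from by push_cast; ring]
        rw [ih (rest.dropWhile fmdnIsNum)
          (by
            have h1 : (rest.dropWhile fmdnIsNum).length ≤ rest.length := List.length_dropWhile_le _ _
            have h2 : rest.length ≤ m := by simpa using Nat.le_of_succ_le_succ h
            omega)
          (i + 1 + (rest.takeWhile fmdnIsNum).length)
          (acc ++ [PySem.Chars.join ['.'] (p :: rest.takeWhile fmdnIsNum)])
          (by
            intro r hr hnum l hl
            exact absurd hnum (by rw [head_dropWhile fmdnIsNum rest r hr]; simp))]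
        rw [show fmdnGoB i (p :: rest) = PySem.Chars.join ['.'] (p :: rest.takeWhile fmdnIsNum) ::
            fmdnGoB (i + 1 + (rest.takeWhile fmdnIsNum).length) (rest.dropWhile fmdnIsNum) from by
          rw [fmdnGoB, if_pos hp]]
        simp
      · -- non-numeric head: both sides emit the same single chunk
        have hp' : fmdnIsNum p = false := by simpa using hp
        have hstep : fmdnStepA acc ((i : Int), p) = acc ++ [fmdnEmit i p] := by
          unfold fmdnStepA fmdnEmit
          by_cases hi : i = 0
          · subst hi
            simp only [Nat.cast_zero]
            by_cases hg : (PySem.Chars.lower p == ['g', 'p', 't']) = true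
            · rw [if_pos (by rw [hg]; rfl), if_pos (by rw [hg]; rfl)]
            · rw [if_neg (by rw [Bool.not_eq_true] at hg; rw [hg]; simp),
                if_neg (by rw [hp']; simp),
                if_neg (by rw [Bool.not_eq_true] at hg; rw [hg]; simp)]
          · have h1 : (((i : Nat) : Int) == 0) = false := by
              simp only [beq_eq_false_iff_ne, ne_eq, Nat.cast_eq_zero]; exact hi
            have h2 : ((i : Nat) == 0) = false := by simpa using hi
            rw [show (((i : Nat) : Int) == 0 && (PySem.Chars.lower p == ['g', 'p', 't'])) = false from by
                rw [h1]; rfl,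
              show ((i : Nat) == 0 && (PySem.Chars.lower p == ['g', 'p', 't'])) = false from by
                rw [h2]; rfl]
            rw [if_neg (by simp), if_neg (by rw [hp']; simp), if_neg (by simp)]
        rw [hstep]
        rw [show (i : Int) + 1 = (((i + 1 : Nat)) : Int) from by push_cast; ring]
        rw [ih rest (by simpa using Nat.le_of_succ_le_succ h) (i + 1) (acc ++ [fmdnEmit i p])
          (by
            intro r hr hnum l hl
            rw [List.getLast?_concat] at hl
            cases hl
            exact emit_not_num i p hp')]
        rw [show fmdnGoB i (p :: rest) = fmdnEmit i p :: fmdnGoB (i + 1) rest from by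
          rw [fmdnGoB, if_neg (by rw [hp']; simp)]]
        simp

-- ===== VERDICT (by name: the statement is the Claim_ definition above) =====
theorem format_model_display_name_spec : Claim_equal_format_model_display_name := by
  intro model_name _
  have h := mainA (PySem.Chars.splitOn model_name.toList ['-']).length
      (PySem.Chars.splitOn model_name.toList ['-']) le_rfl 0 []
      (by intro p _ _ l hl; simp at hl)
  simp only [Nat.cast_zero] at h
  simp only [Spec_format_model_display_name, format_model_display_name,
    format_model_display_name_alt, h, List.nil_append]
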